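-- pv_equiv track=rewrite | github.com/msh1307/addr_search | addr_search.py | cut
-- ===== SOURCE A (Python) =====
-- def cut(s):
--     x = '0x'
--     for i in s[s.find('0x')+2:]:
--         if 0x30<=ord(i)<=0x39 or ord('a')<=ord(i)<=ord('f'):
--             x += i
--         else:
--             break
--     return x
-- ===== SOURCE B (Python) =====
-- _HEX = set('0123456789abcdef')
--
-- def cut(s):
--     t = s[s.find('0x') + 2:]
--     n = next((i for i, c in enumerate(t) if c not in _HEX), len(t))
--     return '0x' + t[:n]
-- ===== Notes on version B (the rewrite author's own statement) =====
-- stated objective: idiomatic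
-- what changed: Instead of growing the result character by character in a loop with break, B locates the first non-hex index of the sliced tail and returns the prefix plus one slice up to that index.
import Mathlib
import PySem

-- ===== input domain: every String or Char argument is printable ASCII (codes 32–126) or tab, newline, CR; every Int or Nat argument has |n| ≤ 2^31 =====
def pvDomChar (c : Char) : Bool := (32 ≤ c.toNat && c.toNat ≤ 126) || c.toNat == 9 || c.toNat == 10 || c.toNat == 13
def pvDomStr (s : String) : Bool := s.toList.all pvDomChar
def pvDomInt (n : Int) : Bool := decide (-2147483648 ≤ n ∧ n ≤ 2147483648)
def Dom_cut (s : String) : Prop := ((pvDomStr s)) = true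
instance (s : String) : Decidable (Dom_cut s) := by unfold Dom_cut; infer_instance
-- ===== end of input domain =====

-- B replaces A's grow-and-break loop by computing the first non-hex index and taking one slice (idiomatic; same cost).

-- ===== PORT A =====
-- the for-loop with break: append while the char is a hex digit, stop at the first other char
def cutLoopA : List Char → String → String
  | [], x => x
  | c :: rest, x =>
    if (0x30 ≤ c.toNat ∧ c.toNat ≤ 0x39) ∨ ('a'.toNat ≤ c.toNat ∧ c.toNat ≤ 'f'.toNat)
    then cutLoopA rest (x.push c)
    else x

def cut (s : String) : String :=
  cutLoopA (PySem.Chars.slice s.toList (some (PySem.Str.find s "0x" + 2)) none) "0x"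

-- ===== PORT B =====
def isHexLower (c : Char) : Bool := (48 ≤ c.toNat && c.toNat ≤ 57) || (97 ≤ c.toNat && c.toNat ≤ 102)

def cut_alt (s : String) : String :=
  let t := PySem.Chars.slice s.toList (some (PySem.Str.find s "0x" + 2)) none
  let n := t.findIdx (fun c => !isHexLower c)   -- first index not in the hex set; length if none
  "0x" ++ String.ofList (t.take n)

-- ===== PRECONDITION & SPEC =====
def Spec_cut (s : String) (out : String) : Prop := out = cut_alt s
instance (s : String) (out : String) : Decidable (Spec_cut s out) := by unfold Spec_cut; infer_instance

-- ===== CLAIM (what is proved, stated in full; the proofs are below) =====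
def Claim_equal_cut : Prop := ∀ (s : String), Dom_cut s → Spec_cut s (cut s)

-- ===== LEMMAS AND PROOFS =====
theorem cutLoopA_toList (cs : List Char) (x : String) :
    (cutLoopA cs x).toList = x.toList ++ cs.take (cs.findIdx (fun c => !isHexLower c)) := by
  induction cs generalizing x with
  | nil => simp [cutLoopA]
  | cons c rest ih =>
    by_cases h : (0x30 ≤ c.toNat ∧ c.toNat ≤ 0x39) ∨ ('a'.toNat ≤ c.toNat ∧ c.toNat ≤ 'f'.toNat)
    · rw [show ('a'.toNat) = 97 from rfl, show ('f'.toNat) = 102 from rfl] at h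
      have hb : (!isHexLower c) = false := by
        simp only [isHexLower, Bool.not_eq_false', Bool.or_eq_true, Bool.and_eq_true,
          decide_eq_true_iff]
        omega
      simp [cutLoopA, h, List.findIdx_cons, hb, ih]
    · rw [show ('a'.toNat) = 97 from rfl, show ('f'.toNat) = 102 from rfl] at h
      have hb : (!isHexLower c) = true := by
        simp only [isHexLower, Bool.not_eq_true', Bool.or_eq_false_iff, Bool.and_eq_false_iff,
          decide_eq_false_iff_not]
        omega
      simp [cutLoopA, h, List.findIdx_cons, hb]

-- ===== VERDICT (by name: the statement is the Claim_ definition above) =====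
theorem cut_spec : Claim_equal_cut := by
  intro s _
  unfold Spec_cut cut cut_alt
  apply String.toList_injective
  simp [cutLoopA_toList]
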